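-- pv_equiv track=rewrite | github.com/Andrewnetwork/MathematicalInvestigations | ComputerVision/AutomataSeedlings/V3/graphHelpers.py | listContinuity
-- ===== SOURCE A (Python) =====
-- def listContinuity(path):
--     deriv = []
--     prev = path[0]
--     prevSwitch = 0
--
--     for elm in path:
--         if elm == prev:
--             deriv.append(prevSwitch)
--         else:
--             prevSwitch = int(not prevSwitch)
--             deriv.append(prevSwitch)
--
--         prev = elm
--
--     return deriv
-- ===== SOURCE B (Python) =====
-- def listContinuity(path):
--     # Phase 1: change flags (first element vs itself gives 0; raises IndexError on empty like A)
--     changes = [int(x != y) for x, y in zip(path, [path[0]] + path[:-1])]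
--     # Phase 2: running parity of the change count
--     deriv = []
--     parity = 0
--     for c in changes:
--         parity = (parity + c) % 2
--         deriv.append(parity)
--     return deriv
-- ===== Notes on version B (the rewrite author's own statement) =====
-- stated objective: alternative
-- what changed: A's single fused pass carrying prev/prevSwitch toggle state is replaced by a two-phase decomposition: first build a change-flag list via zip of the path with its shifted self, then take the running parity (prefix sum mod 2) of those flags.
import Mathlib
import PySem

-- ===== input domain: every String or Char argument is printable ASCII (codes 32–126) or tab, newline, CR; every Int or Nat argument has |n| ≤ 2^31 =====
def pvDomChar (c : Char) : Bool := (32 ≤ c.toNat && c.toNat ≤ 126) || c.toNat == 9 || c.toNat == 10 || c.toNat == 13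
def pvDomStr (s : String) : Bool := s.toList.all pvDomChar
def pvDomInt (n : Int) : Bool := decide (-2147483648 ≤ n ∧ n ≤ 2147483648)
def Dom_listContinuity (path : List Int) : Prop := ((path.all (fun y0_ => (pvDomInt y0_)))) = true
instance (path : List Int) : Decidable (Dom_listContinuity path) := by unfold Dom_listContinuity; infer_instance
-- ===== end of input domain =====

-- B replaces A's fused toggle pass by a two-phase change-flags-then-running-parity scan; same values everywhere both return (both raise IndexError on []).

-- ===== PORT A =====
-- A's for-loop: state (prev, prevSwitch), emitting prevSwitch (toggled on change) at each element.
def listContinuityGo : List Int → Int → Int → List Int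
  | [], _, _ => []
  | elm :: rest, prev, prevSwitch =>
    if elm = prev then
      prevSwitch :: listContinuityGo rest elm prevSwitch
    else
      let sw := if prevSwitch = 0 then (1 : Int) else 0   -- int(not prevSwitch)
      sw :: listContinuityGo rest elm sw

def listContinuity (path : List Int) : List Int :=
  match path with
  | [] => []                      -- Python raises IndexError here (first-element access); excluded by Pre_
  | p0 :: _ => listContinuityGo path p0 0

-- ===== PORT B =====
-- B phase 2: the running-parity loop over the change flags.
def parityScan : List Int → Int → List Int
  | [], _ => []
  | c :: cs, parity =>
    let p' := PySem.Int.mod (parity + c) 2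
    p' :: parityScan cs p'

def listContinuity_alt (path : List Int) : List Int :=
  match path with
  | [] => []                      -- Python raises IndexError here (first-element access); excluded by Pre_
  | p0 :: _ =>
    let changes := List.zipWith (fun x y => if x ≠ y then (1 : Int) else 0) path (p0 :: path.dropLast)
    parityScan changes 0

-- ===== PRECONDITION & SPEC =====
-- Both programs read the first element: the empty list raises IndexError in A (and in B).
def Pre_listContinuity (path : List Int) : Prop := path ≠ []
instance (path : List Int) : Decidable (Pre_listContinuity path) := by unfold Pre_listContinuity; infer_instance
def pvWitness_listContinuity : List Int := ([1, 1, 2, 2, 3] : List Int)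

def Spec_listContinuity (path : List Int) (out : List Int) : Prop := out = listContinuity_alt path
instance (path : List Int) (out : List Int) : Decidable (Spec_listContinuity path out) := by unfold Spec_listContinuity; infer_instance

-- ===== CLAIM (what is proved, stated in full; the proofs are below) =====
def Claim_equal_listContinuity : Prop := ∀ (path : List Int), Dom_listContinuity path → Pre_listContinuity path → Spec_listContinuity path (listContinuity path)

-- ===== LEMMAS AND PROOFS =====

-- Pairing each element with its predecessor: truncation lets us replace dropLast by the list itself.
theorem zipWith_shift_dropLast (f : Int → Int → Int) :
    ∀ (l : List Int) (p : Int),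
      List.zipWith f l (p :: l.dropLast) = List.zipWith f l (p :: l)
  | [], _ => rfl
  | [a], p => rfl
  | a :: b :: t, p => by
    have ih := zipWith_shift_dropLast f (b :: t) a
    simp only [List.zipWith, List.dropLast_cons₂] at ih ⊢
    simpa using ih

-- Core invariant: A's toggle loop equals B's parity scan over the change flags, for any 0/1 switch state.
theorem go_eq_scan :
    ∀ (l : List Int) (prev sw : Int), (sw = 0 ∨ sw = 1) →
      listContinuityGo l prev sw =
        parityScan (List.zipWith (fun x y => if x ≠ y then (1 : Int) else 0) l (prev :: l)) sw
  | [], _, _, _ => rfl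
  | a :: t, prev, sw, hsw => by
    by_cases h : a = prev
    · subst h
      have ih := go_eq_scan t a sw hsw
      have hmod2 : sw.fmod 2 = sw := by
        rcases hsw with h0 | h1 <;> subst_vars <;> decide
      simp only [listContinuityGo, parityScan, List.zipWith, PySem.Int.mod] at ih ⊢
      simp [hmod2, ih]
    · have hne : (if a ≠ prev then (1 : Int) else 0) = 1 := by simp [h]
      have hsw' : (if sw = 0 then (1 : Int) else 0) = PySem.Int.mod (sw + 1) 2 := by
        rcases hsw with h0 | h1 <;> subst_vars <;> decide
      have hsw'' : ((if sw = 0 then (1 : Int) else 0) = 0 ∨ (if sw = 0 then (1 : Int) else 0) = 1) := by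
        rcases hsw with h0 | h1 <;> subst_vars <;> decide
      have ih := go_eq_scan t a _ hsw''
      simp only [listContinuityGo, parityScan, List.zipWith, hne, if_neg h]
      rw [← hsw']
      simp [ih]

-- ===== VERDICT (by name: the statement is the Claim_ definition above) =====
theorem listContinuity_spec : Claim_equal_listContinuity := by
  intro path _ hpre
  unfold Spec_listContinuity
  match path with
  | [] => exact absurd rfl hpre
  | p0 :: rest =>
    show listContinuityGo (p0 :: rest) p0 0 =
      parityScan (List.zipWith (fun x y => if x ≠ y then (1 : Int) else 0)
        (p0 :: rest) (p0 :: (p0 :: rest).dropLast)) 0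
    rw [zipWith_shift_dropLast]
    exact go_eq_scan (p0 :: rest) p0 0 (Or.inl rfl)
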